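-- pv_equiv track=rewrite | github.com/WiseWolfer/Python_works | Обучалка/Labs/Lab_3/main.py | Unique_items
-- ===== SOURCE A (Python) =====
-- def Unique_items(sp= []):
--     counter = 0
--     for i in range(len(sp)):
--         for j in range(i+1, len(sp)):
--             # сравниваем элементы списка пред. и след.
--             if sp[i] != sp[j]:
--                 counter += 1
--     if counter > 0:
--         return True
--     else:
--         return False
-- ===== SOURCE B (Python) =====
-- def Unique_items(sp=[]):
--     if len(sp) < 2:
--         return False
--     first = sp[0]
--     for x in sp:
--         if x != first:
--             return True
--     return False
-- ===== Notes on version B (the rewrite author's own statement) =====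
-- stated objective: faster
-- what changed: Replaces A's nested all-pairs counting loop with a single early-exit pass comparing each element to the first element.
import Mathlib
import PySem

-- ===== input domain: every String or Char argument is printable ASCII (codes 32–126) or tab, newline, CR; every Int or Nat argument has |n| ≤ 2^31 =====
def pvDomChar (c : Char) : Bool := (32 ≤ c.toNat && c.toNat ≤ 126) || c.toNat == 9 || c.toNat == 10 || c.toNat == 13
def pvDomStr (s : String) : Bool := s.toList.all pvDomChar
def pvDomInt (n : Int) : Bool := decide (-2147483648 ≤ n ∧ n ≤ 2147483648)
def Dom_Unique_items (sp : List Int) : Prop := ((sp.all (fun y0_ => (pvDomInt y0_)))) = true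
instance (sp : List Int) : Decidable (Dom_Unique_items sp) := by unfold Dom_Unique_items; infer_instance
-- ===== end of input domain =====

-- B replaces A's O(n^2) nested all-pairs counting with one early-exit pass against the first element (return value equivalence; no mutation involved).

-- ===== PORT A =====
def Unique_items (sp : List Int) : Bool :=
  let counter : Int :=
    (PySem.List.pyRange 0 (sp.length : Int) 1).foldl (fun counter i =>
      (PySem.List.pyRange (i + 1) (sp.length : Int) 1).foldl (fun counter j =>
        -- indices i, j produced by range(len(sp)) are in range, so pyGetD with any default is exact for sp[i], sp[j]
        if PySem.List.pyGetD sp i 0 ≠ PySem.List.pyGetD sp j 0 then counter + 1 else counter)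
      counter) 0
  if counter > 0 then true else false

-- ===== PORT B =====
def Unique_items_alt (sp : List Int) : Bool :=
  if sp.length < 2 then false
  else
    let first := PySem.List.pyGetD sp 0 0   -- sp[0]; in range since len(sp) ≥ 2
    sp.any (fun x => x ≠ first)             -- the early-return for-loop over sp

-- ===== PRECONDITION & SPEC =====
def Spec_Unique_items (sp : List Int) (out : Bool) : Prop := out = Unique_items_alt sp
instance (sp : List Int) (out : Bool) : Decidable (Spec_Unique_items sp out) := by unfold Spec_Unique_items; infer_instance

-- ===== CLAIM (what is proved, stated in full; the proofs are below) =====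
def Claim_equal_Unique_items : Prop := ∀ (sp : List Int), Dom_Unique_items sp → Spec_Unique_items sp (Unique_items sp)

-- ===== LEMMAS AND PROOFS =====

lemma pyGetD_cons_zero (h : Int) (t : List Int) : PySem.List.pyGetD (h :: t) 0 0 = h := by
  simp [PySem.List.pyGetD, PySem.List.pyGet?, PySem.List.pyIdx?]

lemma pairs_iff (sp : List Int) :
    (∃ i ∈ PySem.List.pyRange 0 (sp.length : Int) 1,
        ∃ x ∈ sp.drop (i + 1).toNat, PySem.List.pyGetD sp i 0 ≠ x) ↔
    (∃ x ∈ sp, x ≠ PySem.List.pyGetD sp 0 0) := by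
  constructor
  · rintro ⟨i, hi, x, hx, hne⟩
    rw [PySem.List.mem_pyRange_one] at hi
    have hlt : i.toNat < sp.length := by omega
    have hget : PySem.List.pyGetD sp i 0 = sp[i.toNat] :=
      PySem.List.pyGetD_eq_getElem sp 0 (by omega) (by exact_mod_cast hi.2)
    by_cases hc : PySem.List.pyGetD sp i 0 = PySem.List.pyGetD sp 0 0
    · exact ⟨x, List.mem_of_mem_drop hx, by rw [← hc]; exact fun h => hne h.symm⟩
    · exact ⟨sp[i.toNat], List.getElem_mem hlt, by rw [← hget]; exact hc⟩
  · rintro ⟨x, hx, hne⟩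
    match sp with
    | [] => cases hx
    | h :: t =>
      rw [pyGetD_cons_zero] at hne
      refine ⟨0, ?_, x, ?_, ?_⟩
      · rw [PySem.List.mem_pyRange_one]
        constructor
        · omega
        · have : (0:Int) < ((h :: t).length : Int) := by simp
          simp
      · show x ∈ List.drop (0 + 1 : Int).toNat (h :: t)
        have : ((0 + 1 : Int)).toNat = 1 := by omega
        rw [this]
        simp only [List.drop_one, List.tail_cons]
        rcases List.mem_cons.mp hx with rfl | hmem
        · exact absurd rfl hne
        · exact hmem
      · rw [pyGetD_cons_zero]
        exact fun hh => hne hh.symm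

lemma unique_items_eq_any (sp : List Int) :
    Unique_items sp = sp.any (fun x => x ≠ PySem.List.pyGetD sp 0 0) := by
  unfold Unique_items
  have h1 : ∀ i ∈ PySem.List.pyRange 0 (sp.length : Int) 1, ∀ c : Int,
      (PySem.List.pyRange (i + 1) (sp.length : Int) 1).foldl (fun counter j =>
        if PySem.List.pyGetD sp i 0 ≠ PySem.List.pyGetD sp j 0 then counter + 1 else counter) c
      = c + (((sp.drop (i + 1).toNat).countP
              (fun x => decide (PySem.List.pyGetD sp i 0 ≠ x)) : Nat) : Int) := by
    intro i hi c
    rw [PySem.List.mem_pyRange_one] at hi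
    have step : (PySem.List.pyRange (i + 1) (sp.length : Int) 1).foldl (fun counter j =>
        if PySem.List.pyGetD sp i 0 ≠ PySem.List.pyGetD sp j 0 then counter + 1 else counter) c
        = (sp.drop (i + 1).toNat).foldl
            (fun acc x => if PySem.List.pyGetD sp i 0 ≠ x then acc + 1 else acc) c :=
      PySem.List.foldl_pyRange_pyGetD' sp 0
        (fun acc x => if PySem.List.pyGetD sp i 0 ≠ x then acc + 1 else acc) c (by omega)
    rw [step]
    exact PySem.List.foldl_ite_add_one _ _ _
  rw [PySem.List.foldl_congr_mem' _ _
      (fun c i => c + (((sp.drop (i + 1).toNat).countP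
        (fun x => decide (PySem.List.pyGetD sp i 0 ≠ x)) : Nat) : Int)) 0
      (fun i hi c => h1 i hi c),
    PySem.List.foldl_add]
  have hm : ((PySem.List.pyRange 0 (sp.length : Int) 1).map
      (fun i => (((sp.drop (i + 1).toNat).countP
        (fun x => decide (PySem.List.pyGetD sp i 0 ≠ x)) : Nat) : Int))).sum
      = ((((PySem.List.pyRange 0 (sp.length : Int) 1).map
          (fun i => (sp.drop (i + 1).toNat).countP
            (fun x => decide (PySem.List.pyGetD sp i 0 ≠ x)))).sum : Nat) : Int) := by
    rw [Nat.cast_list_sum, List.map_map]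
    rfl
  rw [hm]
  have key : (0 < ((PySem.List.pyRange 0 (sp.length : Int) 1).map
      (fun i => (sp.drop (i + 1).toNat).countP
        (fun x => decide (PySem.List.pyGetD sp i 0 ≠ x)))).sum) ↔
      (∃ x ∈ sp, x ≠ PySem.List.pyGetD sp 0 0) := by
    rw [Nat.pos_iff_ne_zero, ← pairs_iff, Ne, List.sum_eq_zero_iff]
    simp only [List.forall_mem_map, List.countP_eq_zero]
    push Not
    simp
  set S := ((PySem.List.pyRange 0 (sp.length : Int) 1).map
      (fun i => (sp.drop (i + 1).toNat).countP
        (fun x => decide (PySem.List.pyGetD sp i 0 ≠ x)))).sum with hSdef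
  have hiff0 : ((0:Int) + (S : Int) > 0) ↔ 0 < S := by omega
  by_cases hS : 0 < S
  · rw [if_pos (hiff0.mpr hS)]
    symm
    rw [List.any_eq_true]
    simpa using key.mp hS
  · rw [if_neg (fun hc => hS (hiff0.mp hc))]
    symm
    rw [List.any_eq_false]
    intro x hx
    by_contra hxx
    exact hS (key.mpr ⟨x, hx, by simpa using hxx⟩)

lemma unique_items_alt_eq_any (sp : List Int) :
    Unique_items_alt sp = sp.any (fun x => x ≠ PySem.List.pyGetD sp 0 0) := by
  unfold Unique_items_alt
  split
  · rename_i h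
    match sp, h with
    | [], _ => rfl
    | [x], _ => simp
    | x :: y :: t, h => simp at h
  · rfl

-- ===== VERDICT (by name: the statement is the Claim_ definition above) =====
theorem Unique_items_spec : Claim_equal_Unique_items := by
  intro sp _
  unfold Spec_Unique_items
  rw [unique_items_eq_any, unique_items_alt_eq_any]
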